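-- pv_equiv track=rewrite | github.com/dongyifeng/dyf_py | leetcode/dynamic_programming/486_predict_the_winner.py | predict_the_winner3
-- ===== SOURCE A (Python) =====
-- def predict_the_winner3(nums):
--     n = len(nums)
--     dp = [[None for _ in range(n)] for _ in range(n)]
--
--     for i in range(n):
--         dp[i][i] = nums[i]
--
--     for i in range(n - 2, -1, -1):
--         for j in range(i + 1, n):
--             dp[i][j] = max(nums[i] - dp[i + 1][j], nums[j] - dp[i][j - 1])
--     return dp[0][n - 1] >= 0
-- ===== SOURCE B (Python) =====
-- def predict_the_winner3(nums):
--     memo = {}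
--     stack = [(0, len(nums) - 1)]
--     while stack:
--         i, j = stack[-1]
--         if i == j:
--             memo[(i, j)] = nums[i]
--             stack.pop()
--             continue
--         left = memo.get((i + 1, j))
--         if left is None:
--             stack.append((i + 1, j))
--             continue
--         right = memo.get((i, j - 1))
--         if right is None:
--             stack.append((i, j - 1))
--             continue
--         memo[(i, j)] = max(nums[i] - left, nums[j] - right)
--         stack.pop()
--     return memo[(0, len(nums) - 1)] >= 0
-- ===== Notes on version B (the rewrite author's own statement) =====
-- stated objective: alternative
-- what changed: Replaces A's bottom-up 2-D table fill (diagonal init plus row-by-row sweep over all subintervals) with a demand-driven top-down evaluation: an explicit stack of pending (i,j) intervals and a memo dict, computing only the subinterval values the recurrence actually requests, in the order the requests occur.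
import Mathlib
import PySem

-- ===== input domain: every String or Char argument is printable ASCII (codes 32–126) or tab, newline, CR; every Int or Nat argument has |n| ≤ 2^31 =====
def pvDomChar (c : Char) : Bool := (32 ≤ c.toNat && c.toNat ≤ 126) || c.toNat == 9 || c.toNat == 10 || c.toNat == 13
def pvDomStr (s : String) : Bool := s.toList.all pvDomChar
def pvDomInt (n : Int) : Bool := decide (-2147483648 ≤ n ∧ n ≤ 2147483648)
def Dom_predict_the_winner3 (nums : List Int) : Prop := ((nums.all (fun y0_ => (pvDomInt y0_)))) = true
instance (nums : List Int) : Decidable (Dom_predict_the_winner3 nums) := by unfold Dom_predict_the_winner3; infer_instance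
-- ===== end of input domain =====

-- B replaces A's bottom-up 2-D table fill with a demand-driven top-down evaluation
-- (an explicit stack of pending intervals plus a memo dict); equivalence is proved for
-- nonempty lists (A raises IndexError on [], which Pre_ excludes).

-- ===== PORT A =====
-- the Python list-of-lists table; a read of a still-None cell would be a Python
-- TypeError — A's loop order never reads one, so the `.getD 0` default is unreachable
def pvGetCell (dp : List (List (Option Int))) (i j : Nat) : Option Int :=
  (dp.getD i []).getD j none

def pvSetCell (dp : List (List (Option Int))) (i j : Nat) (v : Int) : List (List (Option Int)) :=
  dp.set i ((dp.getD i []).set j (some v))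

def predict_the_winner3 (nums : List Int) : Bool :=
  let n : Nat := nums.length
  -- dp = [[None for _ in range(n)] for _ in range(n)]
  let dp : List (List (Option Int)) :=
    (PySem.List.pyRange 0 (n : Int) 1).map (fun _ =>
      (PySem.List.pyRange 0 (n : Int) 1).map (fun _ => (none : Option Int)))
  -- for i in range(n): dp[i][i] = nums[i]   (index i is always in range here)
  let dp := (PySem.List.pyRange 0 (n : Int) 1).foldl
      (fun dp i => pvSetCell dp i.toNat i.toNat (PySem.List.pyGetD nums i 0)) dp
  -- for i in range(n-2,-1,-1): for j in range(i+1,n): dp[i][j] = max(...)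
  let dp := (PySem.List.pyRange ((n : Int) - 2) (-1) (-1)).foldl
      (fun dp i =>
        (PySem.List.pyRange (i + 1) (n : Int) 1).foldl
          (fun dp j =>
            pvSetCell dp i.toNat j.toNat
              (max (PySem.List.pyGetD nums i 0 - (pvGetCell dp (i.toNat + 1) j.toNat).getD 0)
                   (PySem.List.pyGetD nums j 0 - (pvGetCell dp i.toNat (j.toNat - 1)).getD 0)))
          dp)
      dp
  -- return dp[0][n-1] >= 0  (raises IndexError when n = 0: excluded by Pre_)
  decide (0 ≤ (pvGetCell dp 0 (n - 1)).getD 0)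

-- ===== PORT B =====
-- the while loop of Source B, one constructor case per iteration shape; the stack is a
-- List with head = top (stack[-1]); fuel only makes the loop total in Lean — the loop
-- makes at most 3·n(n+1)/2 iterations (proved below), so the fuel is never exhausted
def pvBLoop (nums : List Int) :
    Nat → PySem.Dict (Int × Int) Int → List (Int × Int) → PySem.Dict (Int × Int) Int
  | 0, memo, _ => memo
  | _ + 1, memo, [] => memo
  | f + 1, memo, (i, j) :: rest =>
    if i = j then
      -- memo[(i, j)] = nums[i]; stack.pop()   (i always in range here)
      pvBLoop nums f (memo.insert (i, j) (PySem.List.pyGetD nums i 0)) rest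
    else
      match memo.get? (i + 1, j) with
      | none => pvBLoop nums f memo ((i + 1, j) :: (i, j) :: rest)   -- stack.append
      | some left =>
        match memo.get? (i, j - 1) with
        | none => pvBLoop nums f memo ((i, j - 1) :: (i, j) :: rest)
        | some right =>
          pvBLoop nums f
            (memo.insert (i, j)
              (max (PySem.List.pyGetD nums i 0 - left)
                   (PySem.List.pyGetD nums j 0 - right))) rest

def predict_the_winner3_alt (nums : List Int) : Bool :=
  let n : Nat := nums.length
  let memo := pvBLoop nums (3 * (n + 1) * (n + 1)) PySem.Dict.empty [(0, (n : Int) - 1)]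
  -- return memo[(0, len(nums) - 1)] >= 0  (key is present whenever the loop ends, n ≥ 1)
  decide (0 ≤ (memo.get? (0, (n : Int) - 1)).getD 0)

-- ===== PRECONDITION & SPEC =====
-- Pre_ excludes only the empty list, on which A raises IndexError reading the last
-- cell of an empty table; Source B never terminates there (the stack keeps pushing
-- intervals whose right end is negative).
def Pre_predict_the_winner3 (nums : List Int) : Prop := nums ≠ []
instance (nums : List Int) : Decidable (Pre_predict_the_winner3 nums) := by
  unfold Pre_predict_the_winner3; infer_instance

def pvWitness_predict_the_winner3 : List Int := ([1, 5, 2])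

def Spec_predict_the_winner3 (nums : List Int) (out : Bool) : Prop := out = predict_the_winner3_alt nums
instance (nums : List Int) (out : Bool) : Decidable (Spec_predict_the_winner3 nums out) := by unfold Spec_predict_the_winner3; infer_instance

-- ===== CLAIM (what is proved, stated in full; the proofs are below) =====
def Claim_equal_predict_the_winner3 : Prop := ∀ (nums : List Int), Dom_predict_the_winner3 nums → Pre_predict_the_winner3 nums → Spec_predict_the_winner3 nums (predict_the_winner3 nums)

-- ===== LEMMAS AND PROOFS =====

-- the optimal-margin recurrence, fuel-bounded (proof-only helper)
def pvRec (nums : List Int) : Nat → Nat → Nat → Int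
  | 0, _, _ => 0
  | fuel + 1, i, j =>
    if i = j then nums.getD i 0
    else max (nums.getD i 0 - pvRec nums fuel (i + 1) j)
             (nums.getD j 0 - pvRec nums fuel i (j - 1))

-- canonical game value of the interval [i, j] (enough fuel)
def pvV (nums : List Int) (i j : Nat) : Int := pvRec nums (j + 1 - i) i j

theorem pvRec_fuel_congr (nums : List Int) :
    ∀ (f1 f2 i j : Nat), i ≤ j → j + 1 - i ≤ f1 → j + 1 - i ≤ f2 →
      pvRec nums f1 i j = pvRec nums f2 i j := by
  intro f1
  induction f1 with
  | zero => intro f2 i j hij h1 h2; omega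
  | succ f1 ih =>
    intro f2 i j hij h1 h2
    cases f2 with
    | zero => omega
    | succ f2 =>
      simp only [pvRec]
      by_cases hij' : i = j
      · simp [hij']
      · have hlt : i < j := lt_of_le_of_ne hij hij'
        rw [if_neg hij', if_neg hij', ih f2 (i + 1) j (by omega) (by omega) (by omega),
          ih f2 i (j - 1) (by omega) (by omega) (by omega)]

theorem pvV_diag (nums : List Int) (i : Nat) : pvV nums i i = nums.getD i 0 := by
  simp [pvV, pvRec]

theorem pvV_rec (nums : List Int) {i j : Nat} (h : i < j) :
    pvV nums i j = max (nums.getD i 0 - pvV nums (i + 1) j)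
                       (nums.getD j 0 - pvV nums i (j - 1)) := by
  have hfuel : j + 1 - i = (j - i) + 1 := by omega
  rw [pvV, hfuel]
  simp only [pvRec, if_neg (by omega : ¬ i = j)]
  rw [pvRec_fuel_congr nums (j - i) (j + 1 - (i + 1)) (i + 1) j (by omega) (by omega) (by omega),
    pvRec_fuel_congr nums (j - i) ((j - 1) + 1 - i) i (j - 1) (by omega) (by omega) (by omega)]
  rfl

-- well-formedness of the table: n rows, each of length n
def pvWF (dp : List (List (Option Int))) (n : Nat) : Prop :=
  dp.length = n ∧ ∀ r ∈ dp, r.length = n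

theorem pvWF_setCell {dp : List (List (Option Int))} {n i j : Nat} {v : Int}
    (h : pvWF dp n) : pvWF (pvSetCell dp i j v) n := by
  obtain ⟨hl, hr⟩ := h
  by_cases hi : i < dp.length
  · refine ⟨by simpa [pvSetCell] using hl, ?_⟩
    intro r hrm
    rcases List.mem_or_eq_of_mem_set hrm with hm | he
    · exact hr r hm
    · subst he
      rw [List.length_set]
      exact hr _ (by rw [List.getD_eq_getElem?_getD, List.getElem?_eq_getElem hi]; exact List.getElem_mem hi)
  · rw [pvSetCell, List.set_eq_of_length_le (by omega)]
    exact ⟨hl, hr⟩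

theorem pvGetCell_setCell_self {dp : List (List (Option Int))} {n i j : Nat} {v : Int}
    (h : pvWF dp n) (hi : i < n) (hj : j < n) :
    pvGetCell (pvSetCell dp i j v) i j = some v := by
  obtain ⟨hl, hr⟩ := h
  have hi' : i < dp.length := by omega
  have hrow : (dp[i]?.getD []).length = n := by
    rw [List.getElem?_eq_getElem hi']
    exact hr _ (List.getElem_mem hi')
  simp only [pvGetCell, pvSetCell, List.getD_eq_getElem?_getD]
  rw [List.getElem?_set_self (by simpa using hi')]
  simp only [Option.getD_some]
  rw [List.getElem?_set_self (by omega)]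
  rfl

theorem pvGetCell_setCell_ne {dp : List (List (Option Int))} {i j i' j' : Nat} {v : Int}
    (h : i' ≠ i ∨ j' ≠ j) :
    pvGetCell (pvSetCell dp i j v) i' j' = pvGetCell dp i' j' := by
  simp only [pvGetCell, pvSetCell, List.getD_eq_getElem?_getD]
  by_cases hii : i' = i
  · subst hii
    have hjj : j' ≠ j := by tauto
    by_cases hi : i' < dp.length
    · rw [List.getElem?_set_self (by simpa using hi)]
      simp only [Option.getD_some]
      rw [List.getElem?_set_ne (Ne.symm hjj)]
    · rw [List.set_eq_of_length_le (by omega)]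
  · rw [List.getElem?_set_ne (Ne.symm hii)]

-- the initial all-None table
theorem pvInit_WF (n : Nat) :
    pvWF ((PySem.List.pyRange 0 (n : Int) 1).map (fun _ =>
      (PySem.List.pyRange 0 (n : Int) 1).map (fun _ => (none : Option Int)))) n := by
  constructor
  · simp [PySem.List.pyRange_zero_natCast]
  · intro r hrm
    rcases List.mem_map.1 hrm with ⟨_, _, he⟩
    rw [← he]
    simp [PySem.List.pyRange_zero_natCast]

theorem pvInit_getCell (n i j : Nat) :
    pvGetCell ((PySem.List.pyRange 0 (n : Int) 1).map (fun _ =>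
      (PySem.List.pyRange 0 (n : Int) 1).map (fun _ => (none : Option Int)))) i j = none := by
  simp only [pvGetCell, List.getD_eq_getElem?_getD, List.getElem?_map]
  cases h : (PySem.List.pyRange 0 (n : Int) 1)[i]? with
  | none => simp
  | some x =>
    simp only [Option.map_some, Option.getD_some, List.getElem?_map]
    cases (PySem.List.pyRange 0 (n : Int) 1)[j]? <;> simp

theorem pvDiag_fold (nums : List Int) :
    ∀ k : Nat, k ≤ nums.length →
      pvWF ((PySem.List.pyRange 0 (k : Int) 1).foldl
          (fun dp i => pvSetCell dp i.toNat i.toNat (PySem.List.pyGetD nums i 0))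
          ((PySem.List.pyRange 0 (nums.length : Int) 1).map (fun _ =>
            (PySem.List.pyRange 0 (nums.length : Int) 1).map (fun _ => (none : Option Int)))))
        nums.length ∧
      ∀ i j : Nat, pvGetCell ((PySem.List.pyRange 0 (k : Int) 1).foldl
          (fun dp i => pvSetCell dp i.toNat i.toNat (PySem.List.pyGetD nums i 0))
          ((PySem.List.pyRange 0 (nums.length : Int) 1).map (fun _ =>
            (PySem.List.pyRange 0 (nums.length : Int) 1).map (fun _ => (none : Option Int))))) i j
        = if i = j ∧ i < k then some (nums.getD i 0) else none := by
  intro k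
  induction k with
  | zero =>
    intro _
    rw [show ((0 : Nat) : Int) = 0 from rfl, PySem.List.pyRange_one_eq_nil le_rfl]
    refine ⟨pvInit_WF nums.length, ?_⟩
    intro i j
    rw [List.foldl_nil, pvInit_getCell]
    simp
  | succ k ih =>
    intro hk
    obtain ⟨ihWF, ihCell⟩ := ih (by omega)
    have hsplit : PySem.List.pyRange 0 ((k + 1 : Nat) : Int) 1
        = PySem.List.pyRange 0 (k : Nat) 1 ++ [(k : Int)] := by
      push_cast
      exact PySem.List.pyRange_one_succ_right (by positivity)
    rw [hsplit, List.foldl_append]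
    simp only [List.foldl_cons, List.foldl_nil, Int.toNat_natCast, PySem.List.pyGetD_natCast]
    refine ⟨pvWF_setCell ihWF, ?_⟩
    intro i j
    by_cases hik : i = k ∧ j = k
    · obtain ⟨hi, hj⟩ := hik
      subst hi; subst hj
      rw [pvGetCell_setCell_self ihWF (by omega) (by omega)]
      simp
    · rw [pvGetCell_setCell_ne (by tauto), ihCell]
      split_ifs with h1 h2
      · rfl
      · omega
      · omega
      · rfl

-- the outer/inner loop invariant: rows ≥ s are complete, everything else is diagonal-only
def pvInv (nums : List Int) (s : Nat) (dp : List (List (Option Int))) : Prop :=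
  pvWF dp nums.length ∧
  ∀ i j : Nat, pvGetCell dp i j =
    if j < nums.length ∧ i ≤ j ∧ (i = j ∨ s ≤ i) then some (pvV nums i j) else none

theorem pvInner_fold (nums : List Int) (s : Nat) (hs : s + 1 ≤ nums.length) :
    ∀ (d t : Nat), t + d = nums.length → s + 1 ≤ t →
      ∀ dp : List (List (Option Int)),
        pvWF dp nums.length →
        (∀ i j : Nat, pvGetCell dp i j =
          if (j < nums.length ∧ i ≤ j ∧ (i = j ∨ s + 1 ≤ i)) ∨ (i = s ∧ s < j ∧ j < t)
          then some (pvV nums i j) else none) →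
        pvInv nums s
          ((PySem.List.pyRange (t : Int) (nums.length : Int) 1).foldl
            (fun dp j =>
              pvSetCell dp s j.toNat
                (max (nums.getD s 0 - (pvGetCell dp (s + 1) j.toNat).getD 0)
                     (PySem.List.pyGetD nums j 0 - (pvGetCell dp s (j.toNat - 1)).getD 0)))
            dp) := by
  intro d
  induction d with
  | zero =>
    intro t ht hst dp hWF hcell
    have ht' : t = nums.length := by omega
    subst ht'
    rw [PySem.List.pyRange_one_eq_nil le_rfl, List.foldl_nil]
    refine ⟨hWF, ?_⟩
    intro i j
    rw [hcell i j]
    split_ifs with h1 h2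
    · rfl
    · omega
    · omega
    · rfl
  | succ d ih =>
    intro t ht hst dp hWF hcell
    have htn : t < nums.length := by omega
    rw [PySem.List.pyRange_one_cons (by exact_mod_cast htn), List.foldl_cons]
    simp only [Int.toNat_natCast, PySem.List.pyGetD_natCast]
    -- the two cells the new entry reads are already filled
    have hread1 : pvGetCell dp (s + 1) t = some (pvV nums (s + 1) t) := by
      rw [hcell]
      exact if_pos (Or.inl ⟨htn, by omega, Or.inr le_rfl⟩)
    have hread2 : pvGetCell dp s (t - 1) = some (pvV nums s (t - 1)) := by
      rw [hcell]
      rcases eq_or_lt_of_le (show s ≤ t - 1 by omega) with he | hlt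
      · exact if_pos (Or.inl ⟨by omega, by omega, Or.inl he⟩)
      · exact if_pos (Or.inr ⟨rfl, hlt, by omega⟩)
    rw [hread1, hread2]
    simp only [Option.getD_some]
    rw [← pvV_rec nums (show s < t by omega)]
    have harg : ((t : Int) + 1) = (((t + 1 : Nat)) : Int) := by push_cast; ring
    rw [harg]
    refine ih (t + 1) (by omega) (by omega) _ (pvWF_setCell hWF) ?_
    intro i j
    by_cases hstc : i = s ∧ j = t
    · obtain ⟨hi, hj⟩ := hstc
      subst hi; subst hj
      rw [pvGetCell_setCell_self hWF (by omega) (by omega)]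
      rw [if_pos (Or.inr ⟨rfl, by omega, by omega⟩)]
    · rw [pvGetCell_setCell_ne (by tauto), hcell]
      split_ifs with h1 h2
      · rfl
      · omega
      · omega
      · rfl

theorem pvOuter_fold (nums : List Int) :
    ∀ (r : Nat) (dp : List (List (Option Int))), r ≤ nums.length → pvInv nums r dp →
      pvInv nums 0
        ((PySem.List.pyRange ((r : Int) - 1) (-1) (-1)).foldl
          (fun dp i =>
            (PySem.List.pyRange (i + 1) (nums.length : Int) 1).foldl
              (fun dp j =>
                pvSetCell dp i.toNat j.toNat
                  (max (PySem.List.pyGetD nums i 0 - (pvGetCell dp (i.toNat + 1) j.toNat).getD 0)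
                       (PySem.List.pyGetD nums j 0 - (pvGetCell dp i.toNat (j.toNat - 1)).getD 0)))
              dp)
          dp) := by
  intro r
  induction r with
  | zero =>
    intro dp _ hInv
    rw [show ((0 : Nat) : Int) - 1 = -1 by norm_num, PySem.List.pyRange_neg_one_eq_nil le_rfl,
      List.foldl_nil]
    exact hInv
  | succ r ih =>
    intro dp hr hInv
    have hcast : ((r + 1 : Nat) : Int) - 1 = (r : Int) := by push_cast; ring
    rw [hcast, PySem.List.pyRange_neg_one_cons (by omega), List.foldl_cons]
    simp only [Int.toNat_natCast, PySem.List.pyGetD_natCast]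
    have hcast2 : ((r : Int) + 1) = ((r + 1 : Nat) : Int) := by push_cast; ring
    rw [hcast2, show (r : Int) - 1 = ((r : Nat) : Int) - 1 from rfl]
    refine ih _ (by omega) ?_
    refine pvInner_fold nums r hr (nums.length - (r + 1)) (r + 1) (by omega) le_rfl dp hInv.1 ?_
    intro i j
    rw [hInv.2 i j]
    split_ifs with h1 h2
    · rfl
    · omega
    · omega
    · rfl

-- ===== B-side lemmas: the stack/memo invariant of pvBLoop =====

-- an interval the loop may hold: nonneg endpoints inside the list
def pvValidP (n : Nat) (p : Int × Int) : Prop := 0 ≤ p.1 ∧ p.1 ≤ p.2 ∧ p.2 < (n : Int)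

-- every memoised entry is the true game value of a valid interval
def pvGood (nums : List Int) (memo : PySem.Dict (Int × Int) Int) : Prop :=
  ∀ p v, memo.get? p = some v → pvValidP nums.length p ∧ v = pvV nums p.1.toNat p.2.toNat

-- the set of valid intervals not yet memoised (drives the fuel bound)
def pvUSet (n : Nat) (memo : PySem.Dict (Int × Int) Int) : Finset (Nat × Nat) :=
  (Finset.range n ×ˢ Finset.range n).filter
    (fun q => q.1 ≤ q.2 ∧ memo.get? ((q.1 : Int), (q.2 : Int)) = none)

def pvU (n : Nat) (memo : PySem.Dict (Int × Int) Int) : Nat := (pvUSet n memo).card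

theorem pvBLoop_nil (nums : List Int) (f : Nat) (memo : PySem.Dict (Int × Int) Int) :
    pvBLoop nums f memo [] = memo := by
  cases f <;> rfl

theorem pvU_insert (n : Nat) (memo : PySem.Dict (Int × Int) Int) (i j v : Int)
    (h0 : 0 ≤ i) (hij : i ≤ j) (hjn : j < (n : Int))
    (hnone : memo.get? (i, j) = none) :
    pvU n (memo.insert (i, j) v) + 1 = pvU n memo := by
  have hkey : (i.toNat, j.toNat) ∈ pvUSet n memo := by
    simp only [pvUSet, Finset.mem_filter, Finset.mem_product, Finset.mem_range]
    refine ⟨⟨by omega, by omega⟩, by omega, ?_⟩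
    rw [Int.toNat_of_nonneg h0, Int.toNat_of_nonneg (by omega)]
    exact hnone
  have hset : pvUSet n (memo.insert (i, j) v) = (pvUSet n memo).erase (i.toNat, j.toNat) := by
    ext q
    simp only [pvUSet, Finset.mem_erase, Finset.mem_filter, Finset.mem_product, Finset.mem_range,
      PySem.Dict.get?_insert]
    constructor
    · rintro ⟨⟨hq1, hq2⟩, hle, hcond⟩
      by_cases he : ((q.1 : Int), (q.2 : Int)) = (i, j)
      · rw [if_pos he] at hcond; exact absurd hcond (by simp)
      · rw [if_neg he] at hcond
        refine ⟨?_, ⟨hq1, hq2⟩, hle, hcond⟩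
        intro hqe
        apply he
        have h1 : q.1 = i.toNat := by rw [hqe]
        have h2 : q.2 = j.toNat := by rw [hqe]
        rw [h1, h2, Int.toNat_of_nonneg h0, Int.toNat_of_nonneg (by omega)]
    · rintro ⟨hne, ⟨hq1, hq2⟩, hle, hcond⟩
      refine ⟨⟨hq1, hq2⟩, hle, ?_⟩
      rw [if_neg, hcond]
      intro he
      apply hne
      have h1 : (q.1 : Int) = i := by rw [Prod.mk.injEq] at he; exact he.1
      have h2 : (q.2 : Int) = j := by rw [Prod.mk.injEq] at he; exact he.2
      rw [Prod.ext_iff]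
      constructor <;> omega
  have hpos : 0 < (pvUSet n memo).card := Finset.card_pos.mpr ⟨_, hkey⟩
  rw [pvU, pvU, hset, Finset.card_erase_of_mem hkey]
  omega

theorem pv_len_le_U (nums : List Int) (memo : PySem.Dict (Int × Int) Int)
    (st : List (Int × Int))
    (hmem : ∀ p ∈ st, pvValidP nums.length p ∧ memo.get? p = none)
    (hpw : List.Pairwise (fun a b : Int × Int => a.2 - a.1 < b.2 - b.1) st) :
    st.length ≤ pvU nums.length memo := by
  classical
  have hnd : st.Nodup := hpw.imp (fun {a b} h => by
    intro he; rw [he] at h; exact lt_irrefl _ h)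
  have hmap : (st.map (fun p : Int × Int => (p.1.toNat, p.2.toNat))).Nodup := by
    refine List.Nodup.map_on ?_ hnd
    intro x hx y hy hfe
    obtain ⟨⟨hx0, hx1, _⟩, _⟩ := hmem x hx
    obtain ⟨⟨hy0, hy1, _⟩, _⟩ := hmem y hy
    rw [Prod.mk.injEq] at hfe
    rw [Prod.ext_iff]
    constructor <;> omega
  have hsub : (st.map (fun p : Int × Int => (p.1.toNat, p.2.toNat))).toFinset
      ⊆ pvUSet nums.length memo := by
    intro q hq
    rw [List.mem_toFinset, List.mem_map] at hq
    obtain ⟨p, hp, hfp⟩ := hq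
    obtain ⟨⟨h0, h1, h2⟩, hnone⟩ := hmem p hp
    simp only [pvUSet, Finset.mem_filter, Finset.mem_product, Finset.mem_range]
    subst hfp
    refine ⟨⟨by omega, by omega⟩, by omega, ?_⟩
    rw [Int.toNat_of_nonneg h0, Int.toNat_of_nonneg (by omega)]
    exact hnone
  calc st.length = (st.map (fun p : Int × Int => (p.1.toNat, p.2.toNat))).length := by
        rw [List.length_map]
    _ = (st.map (fun p : Int × Int => (p.1.toNat, p.2.toNat))).toFinset.card :=
        (List.toFinset_card_of_nodup hmap).symm
    _ ≤ (pvUSet nums.length memo).card := Finset.card_le_card hsub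

-- one-step unfolding of the loop on a nonempty stack (definitional)
theorem pvBLoop_cons (nums : List Int) (f : Nat) (memo : PySem.Dict (Int × Int) Int)
    (i j : Int) (rest : List (Int × Int)) :
    pvBLoop nums (f + 1) memo ((i, j) :: rest) =
      if i = j then
        pvBLoop nums f (memo.insert (i, j) (PySem.List.pyGetD nums i 0)) rest
      else
        match memo.get? (i + 1, j) with
        | none => pvBLoop nums f memo ((i + 1, j) :: (i, j) :: rest)
        | some left =>
          match memo.get? (i, j - 1) with
          | none => pvBLoop nums f memo ((i, j - 1) :: (i, j) :: rest)
          | some right =>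
            pvBLoop nums f
              (memo.insert (i, j)
                (max (PySem.List.pyGetD nums i 0 - left)
                     (PySem.List.pyGetD nums j 0 - right))) rest := rfl

-- the main loop invariant: if the stack is a chain of not-yet-memoised valid intervals
-- with strictly increasing lengths whose bottom is (0, n-1), and the memo is correct,
-- then with fuel ≥ 3·|uncomputed| − |stack| the loop ends with (0, n-1) memoised
theorem pvB_main (nums : List Int) :
    ∀ (fuel : Nat) (memo : PySem.Dict (Int × Int) Int) (st : List (Int × Int)),
      st ≠ [] →
      pvGood nums memo →
      (∀ p ∈ st, pvValidP nums.length p ∧ memo.get? p = none) →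
      List.Pairwise (fun a b : Int × Int => a.2 - a.1 < b.2 - b.1) st →
      st.getLast? = some (0, (nums.length : Int) - 1) →
      3 * pvU nums.length memo ≤ fuel + st.length →
      (pvBLoop nums fuel memo st).get? (0, (nums.length : Int) - 1)
        = some (pvV nums 0 (nums.length - 1)) := by
  intro fuel
  induction fuel with
  | zero =>
    intro memo st hne hG hmem hpw hlast hfuel
    have h1 := pv_len_le_U nums memo st hmem hpw
    have h2 : 0 < st.length := List.length_pos_iff.mpr hne
    omega
  | succ f ih =>
    intro memo st hne hG hmem hpw hlast hfuel
    cases st with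
    | nil => exact absurd rfl hne
    | cons top rest =>
      obtain ⟨i, j⟩ := top
      obtain ⟨hv0, hnone⟩ := hmem (i, j) (List.mem_cons_self)
      have h0 : 0 ≤ i := hv0.1
      have h1 : i ≤ j := hv0.2.1
      have h2 : j < (nums.length : Int) := hv0.2.2
      have hrest_gap : ∀ p ∈ rest, j - i < p.2 - p.1 := (List.pairwise_cons.mp hpw).1
      have hpw' := (List.pairwise_cons.mp hpw).2
      have hgi : PySem.List.pyGetD nums i 0 = nums.getD i.toNat 0 := by
        have hc : i = ((i.toNat : Nat) : Int) := by omega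
        rw [hc, PySem.List.pyGetD_natCast, Int.toNat_natCast]
      by_cases hij : i = j
      · -- base case: memo[(i,i)] = nums[i]; pop
        subst hij
        rw [pvBLoop_cons, if_pos rfl]
        have hval : PySem.List.pyGetD nums i 0 = pvV nums i.toNat i.toNat := by
          rw [hgi, pvV_diag]
        have hG' : pvGood nums (memo.insert (i, i) (PySem.List.pyGetD nums i 0)) := by
          intro p v hv
          rw [PySem.Dict.get?_insert] at hv
          by_cases hpe : p = (i, i)
          · rw [if_pos hpe] at hv
            refine ⟨by rw [hpe]; exact hv0, ?_⟩
            rw [hpe]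
            simpa [hval] using hv.symm
          · rw [if_neg hpe] at hv
            exact hG p v hv
        have hU : pvU nums.length (memo.insert (i, i) (PySem.List.pyGetD nums i 0)) + 1
            = pvU nums.length memo := pvU_insert _ _ _ _ _ h0 h1 h2 hnone
        cases rest with
        | nil =>
          -- the popped interval was the bottom (0, n-1)
          have htop : ((i : Int), (i : Int)) = ((0 : Int), (nums.length : Int) - 1) := by
            simpa using hlast
          rw [pvBLoop_nil, PySem.Dict.get?_insert, if_pos htop.symm]
          rw [Prod.mk.injEq] at htop
          obtain ⟨ht1, ht2⟩ := htop
          rw [hval, show i.toNat = 0 by omega, show nums.length - 1 = 0 by omega]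
        | cons r rs =>
          refine ih _ _ (List.cons_ne_nil r rs) hG' ?_ hpw' ?_ ?_
          · intro p hp
            refine ⟨(hmem p (List.mem_cons_of_mem _ hp)).1, ?_⟩
            rw [PySem.Dict.get?_insert, if_neg, (hmem p (List.mem_cons_of_mem _ hp)).2]
            intro he
            have hgp := hrest_gap p hp
            rw [he] at hgp
            simp at hgp
          · rw [← hlast]; rfl
          · simp only [List.length_cons] at hfuel ⊢
            omega
      · -- i < j: fetch the two children from the memo or push the missing one
        have hij' : i < j := lt_of_le_of_ne h1 hij
        rw [pvBLoop_cons, if_neg hij]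
        cases hL : memo.get? (i + 1, j) with
        | none =>
          -- stack.append((i + 1, j))
          refine ih _ _ (List.cons_ne_nil _ _) hG ?_ ?_ ?_ ?_
          · intro p hp
            rcases List.mem_cons.mp hp with he | hp'
            · subst he; exact ⟨⟨by omega, by simp; try omega, by simpa using h2⟩, hL⟩
            · exact hmem p hp'
          · refine List.pairwise_cons.mpr ⟨?_, hpw⟩
            intro p hp
            rcases List.mem_cons.mp hp with he | hp'
            · subst he; simp; try omega
            · have := hrest_gap p hp'; simp; try omega
          · rw [← hlast]; rfl
          · simp only [List.length_cons] at hfuel ⊢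
            omega
        | some left =>
          cases hR : memo.get? (i, j - 1) with
          | none =>
            -- stack.append((i, j - 1))
            refine ih _ _ (List.cons_ne_nil _ _) hG ?_ ?_ ?_ ?_
            · intro p hp
              rcases List.mem_cons.mp hp with he | hp'
              · subst he; exact ⟨⟨by simpa using h0, by simp; try omega, by simp; try omega⟩, hR⟩
              · exact hmem p hp'
            · refine List.pairwise_cons.mpr ⟨?_, hpw⟩
              intro p hp
              rcases List.mem_cons.mp hp with he | hp'
              · subst he; simp; try omega
              · have := hrest_gap p hp'; simp; try omega
            · rw [← hlast]; rfl
            · simp only [List.length_cons] at hfuel ⊢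
              omega
          | some right =>
            -- both children known: memo[(i, j)] = max(nums[i] - left, nums[j] - right); pop
            show (pvBLoop nums f
                (memo.insert (i, j)
                  (max (PySem.List.pyGetD nums i 0 - left)
                       (PySem.List.pyGetD nums j 0 - right))) rest).get?
                (0, (nums.length : Int) - 1) = some (pvV nums 0 (nums.length - 1))
            obtain ⟨hLval, hLv⟩ := hG _ _ hL
            obtain ⟨hRval, hRv⟩ := hG _ _ hR
            have hgj : PySem.List.pyGetD nums j 0 = nums.getD j.toNat 0 := by
              have hc : j = ((j.toNat : Nat) : Int) := by omega
              rw [hc, PySem.List.pyGetD_natCast, Int.toNat_natCast]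
            have e1 : (i + 1).toNat = i.toNat + 1 := by omega
            have e2 : (j - 1).toNat = j.toNat - 1 := by omega
            have hLv' : left = pvV nums (i.toNat + 1) j.toNat := by
              simpa [e1] using hLv
            have hRv' : right = pvV nums i.toNat (j.toNat - 1) := by
              simpa [e2] using hRv
            have hval : max (PySem.List.pyGetD nums i 0 - left)
                (PySem.List.pyGetD nums j 0 - right) = pvV nums i.toNat j.toNat := by
              rw [hgi, hgj, hLv', hRv', ← pvV_rec nums (show i.toNat < j.toNat by omega)]
            have hG' : pvGood nums (memo.insert (i, j)
                (max (PySem.List.pyGetD nums i 0 - left)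
                     (PySem.List.pyGetD nums j 0 - right))) := by
              intro p v hv
              rw [PySem.Dict.get?_insert] at hv
              by_cases hpe : p = (i, j)
              · rw [if_pos hpe] at hv
                refine ⟨by rw [hpe]; exact hv0, ?_⟩
                rw [hpe]
                simpa [hval] using hv.symm
              · rw [if_neg hpe] at hv
                exact hG p v hv
            have hU := pvU_insert nums.length memo i j
              (max (PySem.List.pyGetD nums i 0 - left) (PySem.List.pyGetD nums j 0 - right))
              h0 h1 h2 hnone
            cases rest with
            | nil =>
              have htop : ((i : Int), (j : Int)) = ((0 : Int), (nums.length : Int) - 1) := by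
                simpa using hlast
              rw [pvBLoop_nil, PySem.Dict.get?_insert, if_pos htop.symm]
              rw [Prod.mk.injEq] at htop
              obtain ⟨ht1, ht2⟩ := htop
              rw [hval, show i.toNat = 0 by omega, show j.toNat = nums.length - 1 by omega]
            | cons r rs =>
              refine ih _ _ (List.cons_ne_nil r rs) hG' ?_ hpw' ?_ ?_
              · intro p hp
                refine ⟨(hmem p (List.mem_cons_of_mem _ hp)).1, ?_⟩
                rw [PySem.Dict.get?_insert, if_neg, (hmem p (List.mem_cons_of_mem _ hp)).2]
                intro he
                have hgp := hrest_gap p hp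
                rw [he] at hgp
                simp at hgp
              · rw [← hlast]; rfl
              · simp only [List.length_cons] at hfuel ⊢
                omega

-- ===== VERDICT (by name: the statement is the Claim_ definition above) =====
theorem predict_the_winner3_spec : Claim_equal_predict_the_winner3 := by
  intro nums _ hpre
  have hn : 1 ≤ nums.length := by
    cases nums with
    | nil => exact absurd rfl hpre
    | cons a l => simp
  -- A computes pvV nums 0 (n-1) in cell (0, n-1)
  obtain ⟨hdWF, hdCell⟩ := pvDiag_fold nums nums.length le_rfl
  have hInv : pvInv nums (nums.length - 1)
      ((PySem.List.pyRange 0 (nums.length : Int) 1).foldl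
        (fun dp i => pvSetCell dp i.toNat i.toNat (PySem.List.pyGetD nums i 0))
        ((PySem.List.pyRange 0 (nums.length : Int) 1).map (fun _ =>
          (PySem.List.pyRange 0 (nums.length : Int) 1).map (fun _ => (none : Option Int))))) := by
    refine ⟨hdWF, ?_⟩
    intro i j
    rw [hdCell i j]
    split_ifs with h1 h2
    · obtain ⟨hij, _⟩ := h1
      subst hij
      rw [pvV_diag]
    · omega
    · omega
    · rfl
  have houter := pvOuter_fold nums (nums.length - 1) _ (by omega) hInv
  rw [show ((nums.length - 1 : Nat) : Int) - 1 = (nums.length : Int) - 2 by omega] at houter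
  have hfinal := houter.2 0 (nums.length - 1)
  rw [if_pos ⟨by omega, by omega, Or.inr le_rfl⟩] at hfinal
  -- B's loop ends with (0, n-1) bound to the same value
  have hB := pvB_main nums (3 * (nums.length + 1) * (nums.length + 1)) PySem.Dict.empty
      [((0 : Int), (nums.length : Int) - 1)] (List.cons_ne_nil _ _)
      (by intro p v hv; rw [PySem.Dict.get?_empty] at hv; cases hv)
      (by
        intro p hp
        rw [List.mem_singleton] at hp
        subst hp
        exact ⟨⟨le_refl 0, by omega, by omega⟩, PySem.Dict.get?_empty _⟩)
      (List.pairwise_singleton _ _)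
      (by rfl)
      (by
        have hle : pvU nums.length PySem.Dict.empty
            ≤ nums.length * nums.length := by
          calc pvU nums.length PySem.Dict.empty
              ≤ (Finset.range nums.length ×ˢ Finset.range nums.length).card :=
                Finset.card_filter_le _ _
            _ = nums.length * nums.length := by
                rw [Finset.card_product, Finset.card_range]
        simp only [List.length_cons, List.length_nil]
        nlinarith)
  unfold Spec_predict_the_winner3
  simp only [predict_the_winner3, predict_the_winner3_alt]
  rw [hfinal, hB]
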